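-- pv_equiv track=rewrite | github.com/vvkin/discrete-math | LAB_1/source.py | get_incidence_matrix
-- ===== SOURCE A (Python) =====
-- def get_incidence_matrix(edges_list, vertex_num):  # Отримання матриці інцидентності(орієнтований)
--     inc_matrix = [[0] * len(edges_list) for j in range(vertex_num)]
--     edge_number = 0
--     for edge in edges_list:
--         start, finish = edge[0] - 1, edge[1] - 1
--         if start == finish:
--             inc_matrix[start][edge_number] = 2
--         else:
--             inc_matrix[start][edge_number] = -1
--             inc_matrix[finish][edge_number] = 1
--         edge_number += 1
--     return inc_matrix
-- ===== SOURCE B (Python) =====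
-- def get_incidence_matrix(edges_list, vertex_num):
--     # Column-major construction: one column per edge, then transpose
--     # into vertex-by-edge rows.
--     def column(start, finish):
--         col = [0] * vertex_num
--         if start == finish:
--             col[start - 1] = 2
--         else:
--             col[start - 1] = -1
--             col[finish - 1] = 1
--         return col
--
--     columns = [column(a, b) for (a, b) in edges_list]
--     return [[col[v] for col in columns] for v in range(vertex_num)]
-- ===== Notes on version B (the rewrite author's own statement) =====
-- stated objective: alternative
-- what changed: B builds the matrix column-major (one fresh column list per edge, written with plain Python indexing) and then transposes it into vertex-by-edge rows, instead of A's preallocated zero matrix with scattered in-place row writes and a manual edge counter.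
import Mathlib
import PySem

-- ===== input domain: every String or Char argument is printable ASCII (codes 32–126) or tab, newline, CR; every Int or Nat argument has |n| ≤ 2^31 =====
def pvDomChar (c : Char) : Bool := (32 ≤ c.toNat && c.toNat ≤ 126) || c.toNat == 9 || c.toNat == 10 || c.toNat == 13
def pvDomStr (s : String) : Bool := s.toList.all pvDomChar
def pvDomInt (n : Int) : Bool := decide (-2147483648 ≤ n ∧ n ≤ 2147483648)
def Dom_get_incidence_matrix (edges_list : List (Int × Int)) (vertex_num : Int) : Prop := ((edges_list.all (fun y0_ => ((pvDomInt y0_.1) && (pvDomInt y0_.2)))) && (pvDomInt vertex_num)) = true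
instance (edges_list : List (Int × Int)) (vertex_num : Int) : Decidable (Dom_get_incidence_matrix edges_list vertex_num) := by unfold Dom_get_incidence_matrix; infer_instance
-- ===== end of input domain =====

-- B builds the matrix column-major (one column list per edge, then a transpose)
-- instead of A's preallocated zero matrix with scattered in-place writes; equal wherever A returns.

-- ===== PORT A =====
-- Python 'm[i][k] = v' on the row list: a negative i counts from the end;
-- out of range is IndexError (those inputs are excluded by Pre_), modelled as a no-op here.
def pyWrite (m : List (List Int)) (i : Int) (k : Nat) (v : Int) : List (List Int) :=
  let j : Int := if i < 0 then i + m.length else i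
  if 0 ≤ j ∧ j < m.length then
    m.set j.toNat ((m.getD j.toNat []).set k v)
  else m

-- the body of A's 'for edge in edges_list' loop (state: matrix, edge_number)
def stepA (st : List (List Int) × Nat) (edge : Int × Int) : List (List Int) × Nat :=
  let start := edge.1 - 1
  let finish := edge.2 - 1
  (if start = finish then pyWrite st.1 start st.2 2
   else pyWrite (pyWrite st.1 start st.2 (-1)) finish st.2 1,
   st.2 + 1)

def get_incidence_matrix (edges_list : List (Int × Int)) (vertex_num : Int) : List (List Int) :=
  let init := (PySem.List.pyRange 0 vertex_num 1).map (fun _ => List.replicate edges_list.length (0 : Int))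
  (edges_list.foldl stepA (init, 0)).1

-- ===== PORT B =====
-- Python 'col[i] = v' on a flat list: a negative i counts from the end;
-- out of range is IndexError (those inputs are excluded by Pre_), modelled as a no-op here.
def pyWriteRow (row : List Int) (i : Int) (v : Int) : List Int :=
  let j : Int := if i < 0 then i + row.length else i
  if 0 ≤ j ∧ j < row.length then row.set j.toNat v else row

-- B's 'column' helper: one fresh column list per edge
def columnB (vertex_num : Int) (start finish : Int) : List Int :=
  let col := List.replicate vertex_num.toNat (0 : Int)
  if start = finish then pyWriteRow col (start - 1) 2
  else pyWriteRow (pyWriteRow col (start - 1) (-1)) (finish - 1) 1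

-- 'col[v]' with v from range(vertex_num) is always in range; pyGet?'s none case never occurs
def get_incidence_matrix_alt (edges_list : List (Int × Int)) (vertex_num : Int) : List (List Int) :=
  let columns := edges_list.map (fun e => columnB vertex_num e.1 e.2)
  (PySem.List.pyRange 0 vertex_num 1).map (fun v =>
    columns.map (fun col => (PySem.List.pyGet? col v).getD 0))

-- ===== PRECONDITION & SPEC =====
-- Pre_: exactly the inputs on which Python A returns (no IndexError): either no edges,
-- or vertex_num ≥ 1 and every endpoint index A writes is in Python's indexing range.
def Pre_get_incidence_matrix (edges_list : List (Int × Int)) (vertex_num : Int) : Prop :=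
  edges_list = [] ∨
    (1 ≤ vertex_num ∧ ∀ e ∈ edges_list,
      (-vertex_num ≤ e.1 - 1 ∧ e.1 - 1 < vertex_num) ∧
      (e.1 = e.2 ∨ (-vertex_num ≤ e.2 - 1 ∧ e.2 - 1 < vertex_num)))
instance (edges_list : List (Int × Int)) (vertex_num : Int) : Decidable (Pre_get_incidence_matrix edges_list vertex_num) := by unfold Pre_get_incidence_matrix; infer_instance

def pvWitness_get_incidence_matrix : (List (Int × Int)) × Int := ([(1, 2), (2, 2)], 2)

def Spec_get_incidence_matrix (edges_list : List (Int × Int)) (vertex_num : Int) (out : List (List Int)) : Prop := out = get_incidence_matrix_alt edges_list vertex_num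
instance (edges_list : List (Int × Int)) (vertex_num : Int) (out : List (List Int)) : Decidable (Spec_get_incidence_matrix edges_list vertex_num out) := by unfold Spec_get_incidence_matrix; infer_instance

-- ===== CLAIM (what is proved, stated in full; the proofs are below) =====
def Claim_equal_get_incidence_matrix : Prop := ∀ (edges_list : List (Int × Int)) (vertex_num : Int), Dom_get_incidence_matrix edges_list vertex_num → Pre_get_incidence_matrix edges_list vertex_num → Spec_get_incidence_matrix edges_list vertex_num (get_incidence_matrix edges_list vertex_num)


-- ===== LEMMAS AND PROOFS =====

-- proof-side value of cell (v, edge) of the finished matrix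
def cellB (n v : Int) (e : Int × Int) : Int :=
  let s := PySem.Int.mod (e.1 - 1) n
  let f := PySem.Int.mod (e.2 - 1) n
  if e.1 = e.2 then (if s = v then 2 else 0)
  else if f = v then 1
  else if s = v then -1
  else 0

-- the (i, j) entry of a matrix given as a list of rows (0 outside)
def get2 (m : List (List Int)) (i j : Nat) : Int := (m.getD i []).getD j 0

lemma get2_set (m : List (List Int)) (a : Nat) (row : List Int) (i j : Nat) (ha : a < m.length) :
  get2 (m.set a row) i j = if i = a then row.getD j 0 else get2 m i j := by
  simp only [get2, List.getD_eq_getElem?_getD, List.getElem?_set]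
  by_cases h : i = a
  · simp [h, ha]
  · simp [h, (Ne.symm h : a ≠ i)]

lemma getD_set_row (row : List Int) (k : Nat) (v : Int) (j : Nat) (hk : k < row.length) :
  (row.set k v).getD j 0 = if j = k then v else row.getD j 0 := by
  simp only [List.getD_eq_getElem?_getD, List.getElem?_set]
  by_cases h : j = k
  · simp [h, hk]
  · simp [h, (Ne.symm h : k ≠ j)]

lemma pyWrite_spec (m : List (List Int)) {L : Nat} (n t : Int) (k : Nat) (v : Int)
    (hlen : (m.length : Int) = n) (hrows : ∀ r ∈ m, r.length = L)
    (ht1 : -n ≤ t) (ht2 : t < n) (hn : 1 ≤ n) (hk : k < L) :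
    (pyWrite m t k v).length = m.length ∧
    (∀ r ∈ pyWrite m t k v, r.length = L) ∧
    ∀ i j, j < L →
      get2 (pyWrite m t k v) i j =
        if (i : Int) = PySem.Int.mod t n ∧ j = k then v else get2 m i j := by
  subst hlen
  have hmod : PySem.Int.mod t (m.length : Int) = t % (m.length : Int) := PySem.Int.mod_eq_emod_of_pos (by omega)
  have hj0 : (if t < 0 then t + (m.length : Int) else t) = t % (m.length : Int) := by
    split_ifs with h
    · calc t + (m.length : Int) = (t + (m.length : Int)) % (m.length : Int) :=
            (Int.emod_eq_of_lt (by omega) (by omega)).symm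
        _ = t % (m.length : Int) := Int.add_emod_right t _
    · exact (Int.emod_eq_of_lt (by omega) (by omega)).symm
  have hcond : 0 ≤ (if t < 0 then t + (m.length : Int) else t) ∧
      (if t < 0 then t + (m.length : Int) else t) < m.length := by
    rw [hj0]; constructor
    · exact Int.emod_nonneg t (by omega)
    · exact Int.emod_lt_of_pos t (by omega)
  set a : Nat := (if t < 0 then t + (m.length : Int) else t).toNat with ha
  have haInt : (a : Int) = t % (m.length : Int) := by rw [ha, Int.toNat_of_nonneg hcond.1, hj0]
  have halt : a < m.length := by omega
  have hpw : pyWrite m t k v = m.set a ((m.getD a []).set k v) := by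
    simp only [pyWrite]; rw [if_pos hcond]
  have hrowmem : m.getD a [] ∈ m := by
    rw [List.getD_eq_getElem?_getD, List.getElem?_eq_getElem halt]
    exact List.getElem_mem halt
  have hrowlen : (m.getD a []).length = L := hrows _ hrowmem
  refine ⟨by rw [hpw]; simp, ?_, ?_⟩
  · intro r hr
    rw [hpw] at hr
    rcases List.mem_or_eq_of_mem_set hr with h | h
    · exact hrows r h
    · subst h; rw [List.length_set]; exact hrowlen
  · intro i j hj
    rw [hpw, get2_set m a _ i j halt]
    by_cases hi : i = a
    · rw [if_pos hi, getD_set_row _ k v j (by omega)]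
      by_cases hjk : j = k
      · rw [if_pos hjk, if_pos ⟨by rw [hi, haInt, hmod], hjk⟩]
      · rw [if_neg hjk, if_neg (by rintro ⟨_, h⟩; exact hjk h)]
        simp [get2, hi]
    · rw [if_neg hi, if_neg ?_]
      rintro ⟨h1, _⟩
      rw [hmod] at h1
      exact hi (by omega)

def InR (n : Int) (e : Int × Int) : Prop :=
  (-n ≤ e.1 - 1 ∧ e.1 - 1 < n) ∧ (e.1 = e.2 ∨ (-n ≤ e.2 - 1 ∧ e.2 - 1 < n))

lemma stepA_spec (n : Int) {L : Nat} (m : List (List Int)) (k : Nat) (e : Int × Int)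
    (hlen : (m.length : Int) = n) (hrows : ∀ r ∈ m, r.length = L) (hk : k < L)
    (hn : 1 ≤ n) (he : InR n e) (hzero : ∀ i, get2 m i k = 0) :
    (stepA (m, k) e).2 = k + 1 ∧
    (stepA (m, k) e).1.length = m.length ∧
    (∀ r ∈ (stepA (m, k) e).1, r.length = L) ∧
    ∀ i j, j < L →
      get2 (stepA (m, k) e).1 i j =
        if j = k then cellB n (i : Int) e else get2 m i j := by
  obtain ⟨⟨hs1, hs2⟩, hfr⟩ := he
  by_cases heq : e.1 - 1 = e.2 - 1
  · have he12 : e.1 = e.2 := by omega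
    have h2 := pyWrite_spec m n (e.1 - 1) k 2 hlen hrows hs1 hs2 hn hk
    have hstep : stepA (m, k) e = (pyWrite m (e.1 - 1) k 2, k + 1) := by
      simp [stepA, heq]
    refine ⟨by rw [hstep], by rw [hstep]; exact h2.1, by rw [hstep]; exact h2.2.1, ?_⟩
    intro i j hj
    rw [hstep]
    rw [show (pyWrite m (e.1 - 1) k 2, k + 1).1 = pyWrite m (e.1 - 1) k 2 from rfl,
      h2.2.2 i j hj]
    by_cases hjk : j = k
    · by_cases hi : (i : Int) = PySem.Int.mod (e.1 - 1) n <;>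
        simp [cellB, he12, hjk, hi, hzero i, eq_comm]
    · simp [hjk]
  · have he12 : ¬ e.1 = e.2 := by omega
    have hf := hfr.resolve_left he12
    have h1 := pyWrite_spec m n (e.1 - 1) k (-1) hlen hrows hs1 hs2 hn hk
    have h2 := pyWrite_spec (pyWrite m (e.1 - 1) k (-1)) n (e.2 - 1) k 1
      (by rw [h1.1, hlen]) h1.2.1 hf.1 hf.2 hn hk
    have hstep : stepA (m, k) e =
        (pyWrite (pyWrite m (e.1 - 1) k (-1)) (e.2 - 1) k 1, k + 1) := by
      simp [stepA, heq]
    refine ⟨by rw [hstep], by rw [hstep]; rw [show (pyWrite (pyWrite m (e.1 - 1) k (-1)) (e.2 - 1) k 1, k + 1).1 = pyWrite (pyWrite m (e.1 - 1) k (-1)) (e.2 - 1) k 1 from rfl, h2.1, h1.1], by rw [hstep]; exact h2.2.1, ?_⟩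
    intro i j hj
    rw [hstep]
    rw [show (pyWrite (pyWrite m (e.1 - 1) k (-1)) (e.2 - 1) k 1, k + 1).1 = pyWrite (pyWrite m (e.1 - 1) k (-1)) (e.2 - 1) k 1 from rfl,
      h2.2.2 i j hj, h1.2.2 i j hj]
    by_cases hjk : j = k
    · by_cases hif : (i : Int) = PySem.Int.mod (e.2 - 1) n <;>
        by_cases his : (i : Int) = PySem.Int.mod (e.1 - 1) n <;>
        simp [cellB, he12, hjk, hif, his, hzero i, eq_comm]
    · simp [hjk]

lemma foldA_char (n : Int) (hn : 1 ≤ n) (L : Nat) :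
    ∀ (suffix : List (Int × Int)) (k : Nat) (m : List (List Int)),
    (m.length : Int) = n → (∀ r ∈ m, r.length = L) → k + suffix.length ≤ L →
    (∀ e ∈ suffix, InR n e) →
    (∀ i j, k ≤ j → j < L → get2 m i j = 0) →
    ((suffix.foldl stepA (m, k)).1.length : Int) = n ∧
    (∀ row ∈ (suffix.foldl stepA (m, k)).1, row.length = L) ∧
    ∀ i j, j < L →
      get2 (suffix.foldl stepA (m, k)).1 i j =
        if k ≤ j ∧ j < k + suffix.length then cellB n (i : Int) (suffix.getD (j - k) (0, 0))
        else get2 m i j := by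
  intro suffix
  induction suffix with
  | nil =>
    intro k m h1 h2 h3 h4 h5
    refine ⟨h1, h2, ?_⟩
    intro i j hj
    simp only [List.foldl_nil]
    rw [if_neg (by simp only [List.length_nil]; omega)]
  | cons e es ih =>
    intro k m h1 h2 h3 h4 h5
    have hk : k < L := by simp [List.length_cons] at h3; omega
    have hs := stepA_spec n m k e h1 h2 hk hn (h4 e (List.mem_cons_self))
      (fun i => h5 i k le_rfl hk)
    have hpair : stepA (m, k) e = ((stepA (m, k) e).1, k + 1) := by
      rw [← hs.1]
    have hfold : (e :: es).foldl stepA (m, k) = es.foldl stepA ((stepA (m, k) e).1, k + 1) := by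
      rw [List.foldl_cons, ← hpair]
    have hlen' : (((stepA (m, k) e).1.length : Nat) : Int) = n := by rw [hs.2.1]; exact h1
    have hzero' : ∀ i j, k + 1 ≤ j → j < L → get2 (stepA (m, k) e).1 i j = 0 := by
      intro i j hj1 hj2
      rw [hs.2.2.2 i j hj2, if_neg (by omega)]
      exact h5 i j (by omega) hj2
    have hih := ih (k + 1) (stepA (m, k) e).1 hlen' hs.2.2.1
      (by simp [List.length_cons] at h3 ⊢; omega)
      (fun e' he' => h4 e' (List.mem_cons_of_mem _ he')) hzero'
    rw [hfold]
    refine ⟨hih.1, hih.2.1, ?_⟩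
    intro i j hj
    rw [hih.2.2 i j hj]
    by_cases hc1 : k + 1 ≤ j ∧ j < k + 1 + es.length
    · rw [if_pos hc1, if_pos (by simp [List.length_cons]; omega)]
      have : j - k = (j - (k + 1)) + 1 := by omega
      rw [this, List.getD_cons_succ]
    · rw [if_neg hc1]
      by_cases hc2 : j = k
      · subst hc2
        rw [hs.2.2.2 i j hj, if_pos rfl,
          if_pos (⟨le_rfl, by simp only [List.length_cons]; omega⟩ :
            j ≤ j ∧ j < j + (e :: es).length),
          Nat.sub_self, List.getD_cons_zero]
      · rw [hs.2.2.2 i j hj, if_neg hc2, if_neg (by simp [List.length_cons]; omega)]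

-- B side: a single negative-index write into a length-n column
lemma pyWriteRow_spec (row : List Int) (n t : Int) (v : Int)
    (hlen : (row.length : Int) = n) (ht1 : -n ≤ t) (ht2 : t < n) (hn : 1 ≤ n) :
    (pyWriteRow row t v).length = row.length ∧
    ∀ i : Nat, (pyWriteRow row t v).getD i 0 =
      if (i : Int) = PySem.Int.mod t n then v else row.getD i 0 := by
  subst hlen
  have hmod : PySem.Int.mod t (row.length : Int) = t % (row.length : Int) :=
    PySem.Int.mod_eq_emod_of_pos (by omega)
  have hj0 : (if t < 0 then t + (row.length : Int) else t) = t % (row.length : Int) := by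
    split_ifs with h
    · calc t + (row.length : Int) = (t + (row.length : Int)) % (row.length : Int) :=
            (Int.emod_eq_of_lt (by omega) (by omega)).symm
        _ = t % (row.length : Int) := Int.add_emod_right t _
    · exact (Int.emod_eq_of_lt (by omega) (by omega)).symm
  have hcond : 0 ≤ (if t < 0 then t + (row.length : Int) else t) ∧
      (if t < 0 then t + (row.length : Int) else t) < row.length := by
    rw [hj0]
    exact ⟨Int.emod_nonneg t (by omega), Int.emod_lt_of_pos t (by omega)⟩
  set a : Nat := (if t < 0 then t + (row.length : Int) else t).toNat with ha
  have haInt : (a : Int) = t % (row.length : Int) := by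
    rw [ha, Int.toNat_of_nonneg hcond.1, hj0]
  have halt : a < row.length := by omega
  have hpw : pyWriteRow row t v = row.set a v := by
    simp only [pyWriteRow]; rw [if_pos hcond]
  refine ⟨by rw [hpw]; simp, ?_⟩
  intro i
  rw [hpw, getD_set_row row a v i halt, hmod]
  by_cases h : i = a
  · rw [if_pos h, if_pos (by omega)]
  · rw [if_neg h, if_neg (by intro hc; exact h (by omega))]

lemma columnB_spec (n : Int) (e : Int × Int) (hn : 1 ≤ n) (he : InR n e) :
    (columnB n e.1 e.2).length = n.toNat ∧
    ∀ i : Nat, (columnB n e.1 e.2).getD i 0 =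
      if i < n.toNat then cellB n (i : Int) e else 0 := by
  obtain ⟨⟨h1, h2⟩, hfr⟩ := he
  have hrep : ((List.replicate n.toNat (0 : Int)).length : Int) = n := by simp; omega
  have hrepD : ∀ i : Nat, (List.replicate n.toNat (0 : Int)).getD i 0 = 0 := by
    intro i
    rcases Nat.lt_or_ge i n.toNat with h | h
    · rw [List.getD_eq_getElem _ _ (by simpa using h)]; simp
    · rw [List.getD_eq_default _ _ (by simpa using h)]
  by_cases heq : e.1 = e.2
  · have hw := pyWriteRow_spec (List.replicate n.toNat 0) n (e.1 - 1) 2 hrep h1 h2 hn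
    have hcol : columnB n e.1 e.2 = pyWriteRow (List.replicate n.toNat 0) (e.1 - 1) 2 := by
      simp [columnB, heq]
    refine ⟨by rw [hcol, hw.1]; simp, ?_⟩
    intro i
    have hmlt : PySem.Int.mod (e.1 - 1) n < n := by
      rw [PySem.Int.mod_eq_emod_of_pos (by omega)]
      exact Int.emod_lt_of_pos _ (by omega)
    rw [hcol, hw.2 i, hrepD i]
    by_cases hi : (i : Int) = PySem.Int.mod (e.1 - 1) n
    · rw [if_pos hi, if_pos (by omega)]
      simp only [cellB]; split_ifs <;> omega
    · rw [if_neg hi]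
      by_cases hlt : i < n.toNat
      · rw [if_pos hlt]
        simp only [cellB]; split_ifs <;> omega
      · rw [if_neg hlt]
  · have hf := hfr.resolve_left heq
    have hw1 := pyWriteRow_spec (List.replicate n.toNat 0) n (e.1 - 1) (-1) hrep h1 h2 hn
    have hw2 := pyWriteRow_spec (pyWriteRow (List.replicate n.toNat 0) (e.1 - 1) (-1)) n
      (e.2 - 1) 1 (by rw [hw1.1]; exact hrep) hf.1 hf.2 hn
    have hcol : columnB n e.1 e.2 =
        pyWriteRow (pyWriteRow (List.replicate n.toNat 0) (e.1 - 1) (-1)) (e.2 - 1) 1 := by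
      simp [columnB, heq]
    refine ⟨by rw [hcol, hw2.1, hw1.1]; simp, ?_⟩
    intro i
    have hm1 : PySem.Int.mod (e.1 - 1) n < n := by
      rw [PySem.Int.mod_eq_emod_of_pos (by omega)]
      exact Int.emod_lt_of_pos _ (by omega)
    have hm2 : PySem.Int.mod (e.2 - 1) n < n := by
      rw [PySem.Int.mod_eq_emod_of_pos (by omega)]
      exact Int.emod_lt_of_pos _ (by omega)
    rw [hcol, hw2.2 i, hw1.2 i, hrepD i]
    by_cases hif : (i : Int) = PySem.Int.mod (e.2 - 1) n
    · rw [if_pos hif, if_pos (by omega)]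
      simp only [cellB]; split_ifs <;> omega
    · rw [if_neg hif]
      by_cases his : (i : Int) = PySem.Int.mod (e.1 - 1) n
      · rw [if_pos his, if_pos (by omega)]
        simp only [cellB]; split_ifs <;> omega
      · rw [if_neg his]
        by_cases hlt : i < n.toNat
        · rw [if_pos hlt]
          simp only [cellB]; split_ifs <;> omega
        · rw [if_neg hlt]

lemma A_eq_B_of_pre : ∀ (E : List (Int × Int)) (n : Int), Pre_get_incidence_matrix E n →
    get_incidence_matrix E n = get_incidence_matrix_alt E n := by
  intro E n hpre
  rcases hpre with hE | ⟨hn, hInR⟩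
  · subst hE
    simp [get_incidence_matrix, get_incidence_matrix_alt]
  · have hnn : (0 : Int) ≤ n := by omega
    set init := (PySem.List.pyRange 0 n 1).map (fun _ => List.replicate E.length (0 : Int)) with hinit
    have hinitlen : ((init.length : Nat) : Int) = n := by
      simp [hinit, PySem.List.length_pyRange_one]; omega
    have hinitrows : ∀ r ∈ init, r.length = E.length := by
      intro r hr
      simp only [hinit, List.mem_map] at hr
      obtain ⟨_, _, rfl⟩ := hr
      simp
    have hinitzero : ∀ i j, get2 init i j = 0 := by
      intro i j
      unfold get2
      rcases Nat.lt_or_ge i init.length with hi | hi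
      · rw [List.getD_eq_getElem _ _ hi]
        have : init[i] ∈ init := List.getElem_mem hi
        simp only [hinit, List.mem_map] at this
        obtain ⟨_, _, hr⟩ := this
        rw [← hr]
        rcases Nat.lt_or_ge j E.length with hjl | hjl
        · rw [List.getD_eq_getElem _ _ (by simpa using hjl)]; simp
        · rw [List.getD_eq_default _ _ (by simpa using hjl)]
      · rw [List.getD_eq_default _ _ hi]; simp
    have h := foldA_char n hn E.length E 0 init hinitlen hinitrows (by simp)
      (fun e he => (hInR e he)) (fun i j _ _ => hinitzero i j)
    have haltlen : (get_incidence_matrix_alt E n).length = n.toNat := by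
      simp [get_incidence_matrix_alt, PySem.List.length_pyRange_one]
    have hAeq : get_incidence_matrix E n = (E.foldl stepA (init, 0)).1 := rfl
    rw [hAeq]
    apply List.ext_getElem
    · rw [haltlen]; omega
    · intro i h1 h2
      have hrowA : (E.foldl stepA (init, 0)).1[i] ∈ (E.foldl stepA (init, 0)).1 := List.getElem_mem h1
      have hrowAlen : (E.foldl stepA (init, 0)).1[i].length = E.length := h.2.1 _ hrowA
      have hrowBlen : (get_incidence_matrix_alt E n)[i].length = E.length := by
        simp [get_incidence_matrix_alt]
      apply List.ext_getElem
      · rw [hrowAlen, hrowBlen]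
      · intro j hj1 hj2
        have hjE : j < E.length := by omega
        have hgA : (E.foldl stepA (init, 0)).1[i][j] = get2 (E.foldl stepA (init, 0)).1 i j := by
          unfold get2
          rw [List.getD_eq_getElem _ _ h1, List.getD_eq_getElem _ _ (by omega)]
        rw [hgA, h.2.2 i j hjE, if_pos ⟨Nat.zero_le _, by omega⟩]
        have hgetE : E.getD (j - 0) (0, 0) = E[j] := by
          rw [Nat.sub_zero, List.getD_eq_getElem _ _ hjE]
        rw [hgetE]
        have hmem : E[j] ∈ E := List.getElem_mem hjE
        have hilt : i < n.toNat := by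
          have := hinitlen
          simp only [hinit] at h1
          omega
        have hcs := columnB_spec n E[j] hn (hInR _ hmem)
        -- B's (i, j) cell
        simp only [get_incidence_matrix_alt, List.getElem_map,
          PySem.List.getElem_pyRange_one]
        simp only [zero_add]
        rw [PySem.List.pyGet?_of_nonneg _ (by positivity)]
        simp only [Int.toNat_natCast]
        rw [List.getElem?_eq_getElem (by rw [hcs.1]; simpa using hilt)]
        have : (columnB n E[j].1 E[j].2)[i]'(by rw [hcs.1]; simpa using hilt) =
            (columnB n E[j].1 E[j].2).getD i 0 := by
          rw [List.getD_eq_getElem _ _ (by rw [hcs.1]; simpa using hilt)]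
        simp only [Option.getD_some]
        rw [this, hcs.2 i, if_pos hilt]


-- ===== VERDICT (by name: the statement is the Claim_ definition above) =====
theorem get_incidence_matrix_spec : Claim_equal_get_incidence_matrix := by
  intro edges_list vertex_num _ hpre
  unfold Spec_get_incidence_matrix
  exact A_eq_B_of_pre edges_list vertex_num hpre
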